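-- pv_equiv track=rewrite | github.com/cosyfluf/CosBit-AR | modem.py | _deinterleave_bits
-- ===== SOURCE A (Python) =====
-- def _deinterleave_bits(bits):
--     cols = 8
--     rows = len(bits) // cols
--     original = [""] * len(bits)
--     idx = 0
--     for c in range(cols):
--         for r in range(rows):
--             if idx < len(bits):
--                 original[r * cols + c] = bits[idx]
--                 idx += 1
--     return "".join(original)
-- ===== SOURCE B (Python) =====
-- def _deinterleave_bits(bits):
--     rows = len(bits) // 8
--     return "".join(bits[(p % 8) * rows + p // 8] for p in range(8 * rows))
-- ===== Notes on version B (the rewrite author's own statement) =====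
-- stated objective: simpler
-- what changed: B gathers: it maps over the 8*(len//8) output positions reading bits[(p % 8) * rows + p // 8] directly into the joined string, instead of A's scatter that preallocates a padded list, walks columns-then-rows with a running source index and a length guard, and joins the leftovers as empty strings.
import Mathlib
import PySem

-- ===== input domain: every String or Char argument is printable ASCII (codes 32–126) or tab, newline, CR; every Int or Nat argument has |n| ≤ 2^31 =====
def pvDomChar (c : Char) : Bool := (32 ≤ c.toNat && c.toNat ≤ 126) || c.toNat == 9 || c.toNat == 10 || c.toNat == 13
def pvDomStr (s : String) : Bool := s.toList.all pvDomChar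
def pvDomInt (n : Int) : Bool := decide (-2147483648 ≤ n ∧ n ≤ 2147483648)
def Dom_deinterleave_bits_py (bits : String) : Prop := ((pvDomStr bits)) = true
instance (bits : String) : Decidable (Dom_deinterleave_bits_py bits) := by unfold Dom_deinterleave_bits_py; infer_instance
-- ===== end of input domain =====

-- B gathers each output position from its computed source index (one map over destinations),
-- instead of A's column-major scatter into a preallocated array; objective: simpler, same cost.

-- ===== PORT A =====
-- one scatter step of A's inner loop (cols = 8 is A's local constant); the guard `idx < len(bits)`
-- is A's own; `bl.getD st.2 ' '` is bits[idx], exact because the guard makes the index in range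
def pvAStep (bl : List Char) (c : Nat) (st : List (List Char) × Nat) (r : Nat) :
    List (List Char) × Nat :=
  if st.2 < bl.length then (st.1.set (r * 8 + c) [bl.getD st.2 ' '], st.2 + 1) else st

def deinterleave_bits_py (bits : String) : String :=
  let bl := bits.toList
  let rows := bl.length / 8          -- len(bits) // cols, exact for Nat lengths
  let original : List (List Char) := List.replicate bl.length []   -- [""] * len(bits)
  let fin := (List.range 8).foldl
    (fun st c => (List.range rows).foldl (pvAStep bl c) st) (original, 0)
  String.ofList (PySem.Chars.join [] fin.1)   -- "".join(original)

-- ===== PORT B =====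
def deinterleave_bits_py_alt (bits : String) : String :=
  let bl := bits.toList
  let rows := bl.length / 8
  -- bits[(p % 8) * rows + p // 8]: the index is always in range for p < 8*rows, so getD is exact
  String.ofList ((List.range (8 * rows)).map (fun p => bl.getD ((p % 8) * rows + p / 8) ' '))

-- ===== PRECONDITION & SPEC =====
def Spec_deinterleave_bits_py (bits : String) (out : String) : Prop := out = deinterleave_bits_py_alt bits
instance (bits : String) (out : String) : Decidable (Spec_deinterleave_bits_py bits out) := by unfold Spec_deinterleave_bits_py; infer_instance

-- ===== CLAIM (what is proved, stated in full; the proofs are below) =====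
def Claim_equal_deinterleave_bits_py : Prop := ∀ (bits : String), Dom_deinterleave_bits_py bits → Spec_deinterleave_bits_py bits (deinterleave_bits_py bits)

-- ===== LEMMAS AND PROOFS =====

-- PySem.Chars.join with the empty separator is concatenation
lemma pv_join_nil (l : List (List Char)) : PySem.Chars.join [] l = l.flatten := by
  induction l with
  | nil => rfl
  | cons x xs ih =>
    cases xs with
    | nil => simp [PySem.Chars.join, List.intercalate]
    | cons y ys =>
      rw [PySem.Chars.join_cons_cons] at *
      simp_all

-- A's inner loop over r for a fixed column c: starting at idx = c*rows it writes
-- bits[c*rows + r] into cell r*8 + c for r < m, and advances idx by m.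
lemma pv_inner (bl : List Char) (c : Nat) (hc : c < 8) :
    ∀ m, m ≤ bl.length / 8 → ∀ arr : List (List Char), arr.length = bl.length →
      (List.range m).foldl (pvAStep bl c) (arr, c * (bl.length / 8)) =
        ((List.range m).foldl
          (fun a r => a.set (r * 8 + c) [bl.getD (c * (bl.length / 8) + r) ' ']) arr,
         c * (bl.length / 8) + m) := by
  intro m
  induction m with
  | zero => intro _ arr _; simp
  | succ m ih =>
    intro hm arr harr
    rw [List.range_succ, List.foldl_append, List.foldl_append, ih (by omega) arr harr]
    have h7 : c * (bl.length / 8) ≤ 7 * (bl.length / 8) :=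
      Nat.mul_le_mul_right _ (by omega)
    have hidx : c * (bl.length / 8) + m < bl.length := by omega
    simp [pvAStep, hidx]
    omega

-- scatter preserves length
lemma pv_scatter_len (bl : List Char) (c : Nat) :
    ∀ m, ∀ arr : List (List Char),
      ((List.range m).foldl
        (fun a r => a.set (r * 8 + c) [bl.getD (c * (bl.length / 8) + r) ' ']) arr).length
      = arr.length := by
  intro m
  induction m with
  | zero => intro arr; simp
  | succ m ih =>
    intro arr
    rw [List.range_succ, List.foldl_append]
    simp only [List.foldl_cons, List.foldl_nil]
    rw [List.length_set]
    exact ih arr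

-- the scatter-fold of column c only changes cells i with i % 8 = c, i / 8 < m
lemma pv_scatter_get (bl : List Char) (c : Nat) (hc : c < 8) :
    ∀ m, m ≤ bl.length / 8 → ∀ arr : List (List Char), arr.length = bl.length → ∀ i,
      ((List.range m).foldl
        (fun a r => a.set (r * 8 + c) [bl.getD (c * (bl.length / 8) + r) ' ']) arr)[i]? =
      if i % 8 = c ∧ i / 8 < m then some [bl.getD (c * (bl.length / 8) + i / 8) ' ']
      else arr[i]? := by
  intro m
  induction m with
  | zero => intro _ arr _ i; simp
  | succ m ih =>
    intro hm arr harr i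
    rw [List.range_succ, List.foldl_append]
    simp only [List.foldl_cons, List.foldl_nil]
    rw [List.getElem?_set, pv_scatter_len, harr, ih (by omega) arr harr i]
    by_cases h1 : m * 8 + c = i
    · subst h1
      have hin : m * 8 + c < bl.length := by omega
      have hmod : (m * 8 + c) % 8 = c := by omega
      have hdiv : (m * 8 + c) / 8 = m := by omega
      simp [hin, hmod, hdiv]
    · rw [if_neg h1]
      simp only [show (i % 8 = c ∧ i / 8 < m + 1) ↔ (i % 8 = c ∧ i / 8 < m) from by omega]

-- A's whole double loop: after the first k columns, cell i holds bits[(i%8)*rows + i/8]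
-- iff i % 8 < k and i / 8 < rows, and idx = k*rows.
lemma pv_outer (bl : List Char) :
    ∀ k, k ≤ 8 →
      ((List.range k).foldl
        (fun st c => (List.range (bl.length / 8)).foldl (pvAStep bl c) st)
        (List.replicate bl.length ([] : List Char), 0)).2 = k * (bl.length / 8) ∧
      ((List.range k).foldl
        (fun st c => (List.range (bl.length / 8)).foldl (pvAStep bl c) st)
        (List.replicate bl.length ([] : List Char), 0)).1.length = bl.length ∧
      ∀ i, (((List.range k).foldl
        (fun st c => (List.range (bl.length / 8)).foldl (pvAStep bl c) st)
        (List.replicate bl.length ([] : List Char), 0)).1)[i]? =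
        if i % 8 < k ∧ i / 8 < bl.length / 8
        then some [bl.getD ((i % 8) * (bl.length / 8) + i / 8) ' ']
        else (List.replicate bl.length ([] : List Char))[i]? := by
  intro k
  induction k with
  | zero => simp
  | succ k ih =>
    intro hk
    obtain ⟨hidx, hlen, hget⟩ := ih (by omega)
    rw [List.range_succ, List.foldl_append]
    simp only [List.foldl_cons, List.foldl_nil]
    set st := (List.range k).foldl
        (fun st c => (List.range (bl.length / 8)).foldl (pvAStep bl c) st)
        (List.replicate bl.length ([] : List Char), 0) with hst
    have hpair : st = (st.1, k * (bl.length / 8)) := by rw [← hidx]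
    rw [hpair, pv_inner bl k (by omega) (bl.length / 8) le_rfl st.1 hlen]
    refine ⟨by ring, by rw [pv_scatter_len]; exact hlen, ?_⟩
    intro i
    rw [pv_scatter_get bl k (by omega) (bl.length / 8) le_rfl st.1 hlen i, hget i]
    by_cases h1 : i % 8 = k ∧ i / 8 < bl.length / 8
    · simp [h1]
    · rw [if_neg h1]
      split_ifs <;> first | rfl | omega

-- ===== VERDICT (by name: the statement is the Claim_ definition above) =====
theorem deinterleave_bits_py_spec : Claim_equal_deinterleave_bits_py := by
  intro bits _
  unfold Spec_deinterleave_bits_py deinterleave_bits_py deinterleave_bits_py_alt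
  simp only []
  set bl := bits.toList with hbl
  obtain ⟨-, hlen, hget⟩ := pv_outer bl 8 le_rfl
  congr 1
  rw [pv_join_nil]
  have harr : ((List.range 8).foldl
      (fun st c => (List.range (bl.length / 8)).foldl (pvAStep bl c) st)
      (List.replicate bl.length ([] : List Char), 0)).1 =
      (List.range bl.length).map
        (fun i => if i / 8 < bl.length / 8
          then [bl.getD ((i % 8) * (bl.length / 8) + i / 8) ' '] else []) := by
    apply List.ext_getElem?
    intro i
    rw [hget i]
    by_cases hi : i < bl.length
    · simp [hi, show i % 8 < 8 by omega]
      split_ifs <;> simp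
    · simp [show ¬ i < bl.length from hi]
      omega
  rw [harr]
  have hr : List.range bl.length
      = List.range (8 * (bl.length / 8)) ++ (List.range (bl.length % 8)).map (8 * (bl.length / 8) + ·) := by
    rw [← List.range_add]
    congr 1
    omega
  rw [hr, List.map_append, List.flatten_append]
  have h2 : ((List.range (bl.length % 8)).map (fun j => 8 * (bl.length / 8) + j)).map
      (fun i => if i / 8 < bl.length / 8
        then [bl.getD ((i % 8) * (bl.length / 8) + i / 8) ' '] else [])
      = List.replicate (bl.length % 8) ([] : List Char) := by
    rw [List.map_map, List.eq_replicate_iff]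
    constructor
    · simp
    · intro b hb
      simp only [List.mem_map, List.mem_range] at hb
      obtain ⟨j, hj, hbj⟩ := hb
      rw [← hbj]
      simp [show ¬ (8 * (bl.length / 8) + j) / 8 < bl.length / 8 by omega]
  rw [h2]
  have h3 : (List.range (8 * (bl.length / 8))).map
      (fun i => if i / 8 < bl.length / 8
        then [bl.getD ((i % 8) * (bl.length / 8) + i / 8) ' '] else [])
      = (List.range (8 * (bl.length / 8))).map
        (fun i => [bl.getD ((i % 8) * (bl.length / 8) + i / 8) ' ']) := by
    apply List.map_congr_left
    intro i hi
    simp only [List.mem_range] at hi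
    simp [show i / 8 < bl.length / 8 by omega]
  rw [h3, show (List.range (8 * (bl.length / 8))).map
        (fun i => [bl.getD ((i % 8) * (bl.length / 8) + i / 8) ' '])
      = ((List.range (8 * (bl.length / 8))).map
        (fun i => bl.getD ((i % 8) * (bl.length / 8) + i / 8) ' ')).map (fun x => [x])
      from by rw [List.map_map]; rfl,
     ← pv_join_nil, PySem.Chars.join_nil_singletons]
  simp
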